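-- pv_equiv track=rewrite | github.com/saagpatel/GithubRepoAuditor | src/approval_ledger.py | _next_review
-- ===== SOURCE A (Python) =====
-- from typing import Any
--
-- FOLLOW_UP_STATE_PRIORITY = {
--     "needs-reapproval": 0,
--     "overdue-follow-up": 1,
--     "ready-for-review": 2,
--     "due-soon-follow-up": 3,
--     "approved-manual": 4,
--     "blocked": 5,
--     "applied": 6,
--     "not-applicable": 7,
-- }
--
-- def _review_priority(item: dict[str, Any]) -> tuple[int, str]:
--     state = str(item.get("approval_state") or "not-applicable")
--     follow_up_state = str(item.get("follow_up_state") or "not-applicable")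
--     if state == "needs-reapproval":
--         priority_key = "needs-reapproval"
--     elif follow_up_state == "overdue-follow-up":
--         priority_key = "overdue-follow-up"
--     elif state == "ready-for-review":
--         priority_key = "ready-for-review"
--     elif follow_up_state == "due-soon-follow-up":
--         priority_key = "due-soon-follow-up"
--     elif state == "approved-manual":
--         priority_key = "approved-manual"
--     elif state == "blocked":
--         priority_key = "blocked"
--     elif state == "applied":
--         priority_key = "applied"
--     else:
--         priority_key = "not-applicable"
--     return (FOLLOW_UP_STATE_PRIORITY.get(priority_key, 99), str(item.get("label") or ""))
--
-- def _next_review(records: list[dict[str, Any]]) -> dict[str, Any]: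
--     actionable = [item for item in records if item.get("approval_state") != "not-applicable"]
--     if not actionable:
--         return {"summary": "Stay local for now; no current approval needs review."}
--     ordered = sorted(
--         actionable,
--         key=_review_priority,
--     )
--     top = dict(ordered[0])
--     state = str(top.get("approval_state") or "not-applicable")
--     follow_up_state = str(top.get("follow_up_state") or "not-applicable")
--     label = str(top.get("label") or top.get("subject_key") or "Approval")
--     if state == "needs-reapproval":
--         top["summary"] = f"Re-approve {label} before any manual apply step."
--     elif follow_up_state == "overdue-follow-up":
--         top["summary"] = f"Review {label} next because its local follow-up review is overdue."
--     elif state == "ready-for-review":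
--         top["summary"] = f"Review {label} next and decide whether to capture approval."
--     elif follow_up_state == "due-soon-follow-up":
--         top["summary"] = f"Review {label} next because its approved state needs a fresh local follow-up soon."
--     elif state == "approved-manual":
--         top["summary"] = f"{label} is approved; the next move is still an explicit manual apply."
--     elif state == "blocked":
--         top["summary"] = f"{label} is blocked; resolve the non-approval blockers before expecting approval to help."
--     else:
--         top["summary"] = f"{label} has already been applied and does not need a fresh approval yet."
--     return top
-- ===== SOURCE B (Python) =====
-- # B: single min-scan over actionable records driven by an ordered rule table
-- # (priority = index of first matching rule), instead of A's sort + duplicated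
-- # if/elif summary cascade.
--
-- _RULES = [
--     (lambda s, f: s == "needs-reapproval",
--      "Re-approve {label} before any manual apply step."),
--     (lambda s, f: f == "overdue-follow-up",
--      "Review {label} next because its local follow-up review is overdue."),
--     (lambda s, f: s == "ready-for-review",
--      "Review {label} next and decide whether to capture approval."),
--     (lambda s, f: f == "due-soon-follow-up",
--      "Review {label} next because its approved state needs a fresh local follow-up soon."),
--     (lambda s, f: s == "approved-manual",
--      "{label} is approved; the next move is still an explicit manual apply."),
--     (lambda s, f: s == "blocked",
--      "{label} is blocked; resolve the non-approval blockers before expecting approval to help."),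
--     (lambda s, f: s == "applied",
--      "{label} has already been applied and does not need a fresh approval yet."),
--     (lambda s, f: True,
--      "{label} has already been applied and does not need a fresh approval yet."),
-- ]
--
--
-- def _next_review(records):
--     best = None  # ((priority, tiebreak_label), item), first-wins on ties
--     for item in records:
--         if item.get("approval_state") == "not-applicable":
--             continue
--         state = str(item.get("approval_state") or "not-applicable")
--         follow = str(item.get("follow_up_state") or "not-applicable")
--         pri = next(i for i, (pred, _) in enumerate(_RULES) if pred(state, follow))
--         key = (pri, str(item.get("label") or ""))
--         if best is None or key < best[0]:
--             best = (key, item)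
--     if best is None:
--         return {"summary": "Stay local for now; no current approval needs review."}
--     (pri, _), chosen = best
--     top = dict(chosen)
--     label = str(top.get("label") or top.get("subject_key") or "Approval")
--     top["summary"] = _RULES[pri][1].format(label=label)
--     return top
-- ===== Notes on version B (the rewrite author's own statement) =====
-- stated objective: simpler
-- what changed: Replaces A's full stable sort plus a second duplicated if/elif summary cascade with one ordered rule table (predicate + summary template) and a single first-wins min-scan over the actionable records; the chosen rule's index is the priority and its template builds the summary.
import Mathlib
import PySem

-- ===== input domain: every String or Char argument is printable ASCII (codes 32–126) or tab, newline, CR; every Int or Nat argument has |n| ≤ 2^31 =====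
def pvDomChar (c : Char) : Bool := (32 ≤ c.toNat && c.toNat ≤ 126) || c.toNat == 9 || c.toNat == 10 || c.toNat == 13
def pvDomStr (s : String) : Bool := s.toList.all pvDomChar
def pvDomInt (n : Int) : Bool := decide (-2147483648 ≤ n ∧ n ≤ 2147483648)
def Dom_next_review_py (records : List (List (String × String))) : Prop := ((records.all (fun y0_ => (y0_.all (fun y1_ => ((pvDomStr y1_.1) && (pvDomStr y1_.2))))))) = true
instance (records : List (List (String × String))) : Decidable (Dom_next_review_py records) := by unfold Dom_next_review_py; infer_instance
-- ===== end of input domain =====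

-- B replaces A's stable sort + duplicated if/elif summary cascade by one ordered
-- rule table and a single first-wins min-scan (objective: simpler).
-- Records are Python dicts: `d.get(k)` is the first-match lookup, `d[k] = v`
-- overwrites in place / appends a fresh key (exact for dict inputs).

-- ===== PORT A =====
-- dict.get(k): first-match lookup on the association list (exact for a dict)
def pvGetS (r : List (String × String)) (k : String) : Option String :=
  (r.find? (fun p => p.1 == k)).map (·.2)

-- str(x or d) for x an optional string: None and "" are falsy
def pvOrD (o : Option String) (d : String) : String :=
  match o with
  | none => d
  | some s => if s = "" then d else s

-- d[k] = v on a dict: overwrite keeps position, a new key appends (exact for a dict)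
def pvSetK (r : List (String × String)) (k v : String) : List (String × String) :=
  if r.any (fun p => p.1 == k) then
    r.map (fun p => if p.1 == k then (k, v) else p)
  else r ++ [(k, v)]

def FOLLOW_UP_STATE_PRIORITY : List (String × Int) :=
  [("needs-reapproval", 0), ("overdue-follow-up", 1), ("ready-for-review", 2),
   ("due-soon-follow-up", 3), ("approved-manual", 4), ("blocked", 5),
   ("applied", 6), ("not-applicable", 7)]

-- FOLLOW_UP_STATE_PRIORITY.get(k, 99)
def pvFuspGet (k : String) : Int :=
  (((FOLLOW_UP_STATE_PRIORITY.find? (fun p => p.1 == k)).map (·.2)).getD 99)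

def review_priority (item : List (String × String)) : Int × String :=
  let state := pvOrD (pvGetS item "approval_state") "not-applicable"
  let follow_up_state := pvOrD (pvGetS item "follow_up_state") "not-applicable"
  let priority_key :=
    if state = "needs-reapproval" then "needs-reapproval"
    else if follow_up_state = "overdue-follow-up" then "overdue-follow-up"
    else if state = "ready-for-review" then "ready-for-review"
    else if follow_up_state = "due-soon-follow-up" then "due-soon-follow-up"
    else if state = "approved-manual" then "approved-manual"
    else if state = "blocked" then "blocked"
    else if state = "applied" then "applied"
    else "not-applicable"
  (pvFuspGet priority_key, pvOrD (pvGetS item "label") "")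

def next_review_py (records : List (List (String × String))) : List (String × String) :=
  let actionable := records.filter (fun item => pvGetS item "approval_state" ≠ some "not-applicable")
  if actionable = [] then
    [("summary", "Stay local for now; no current approval needs review.")]
  else
    let ordered := PySem.List.sorted2 actionable
      (fun it => (review_priority it).1) (fun it => (review_priority it).2)
    match ordered with
    | [] => []  -- unreachable: ordered is a permutation of the nonempty actionable
    | top0 :: _ =>
      let top := top0  -- dict(top): a fresh copy of the chosen record
      let state := pvOrD (pvGetS top "approval_state") "not-applicable"
      let follow_up_state := pvOrD (pvGetS top "follow_up_state") "not-applicable"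
      let label := pvOrD (pvGetS top "label") (pvOrD (pvGetS top "subject_key") "Approval")
      let summary :=
        if state = "needs-reapproval" then
          "Re-approve " ++ label ++ " before any manual apply step."
        else if follow_up_state = "overdue-follow-up" then
          "Review " ++ label ++ " next because its local follow-up review is overdue."
        else if state = "ready-for-review" then
          "Review " ++ label ++ " next and decide whether to capture approval."
        else if follow_up_state = "due-soon-follow-up" then
          "Review " ++ label ++ " next because its approved state needs a fresh local follow-up soon."
        else if state = "approved-manual" then
          label ++ " is approved; the next move is still an explicit manual apply."
        else if state = "blocked" then
          label ++ " is blocked; resolve the non-approval blockers before expecting approval to help."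
        else
          label ++ " has already been applied and does not need a fresh approval yet."
      pvSetK top "summary" summary

-- ===== PORT B =====
-- the ordered rule table _RULES: (predicate over (state, follow), summary template)
def pvRules : List ((String → String → Bool) × (String → String)) :=
  [ (fun s _ => s == "needs-reapproval",
     fun l => "Re-approve " ++ l ++ " before any manual apply step."),
    (fun _ f => f == "overdue-follow-up",
     fun l => "Review " ++ l ++ " next because its local follow-up review is overdue."),
    (fun s _ => s == "ready-for-review",
     fun l => "Review " ++ l ++ " next and decide whether to capture approval."),
    (fun _ f => f == "due-soon-follow-up",
     fun l => "Review " ++ l ++ " next because its approved state needs a fresh local follow-up soon."),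
    (fun s _ => s == "approved-manual",
     fun l => l ++ " is approved; the next move is still an explicit manual apply."),
    (fun s _ => s == "blocked",
     fun l => l ++ " is blocked; resolve the non-approval blockers before expecting approval to help."),
    (fun s _ => s == "applied",
     fun l => l ++ " has already been applied and does not need a fresh approval yet."),
    (fun _ _ => true,
     fun l => l ++ " has already been applied and does not need a fresh approval yet.") ]

def next_review_py_alt (records : List (List (String × String))) : List (String × String) :=
  let best := records.foldl
    (fun best item =>
      if pvGetS item "approval_state" == some "not-applicable" then best
      else
        let state := pvOrD (pvGetS item "approval_state") "not-applicable"
        let follow := pvOrD (pvGetS item "follow_up_state") "not-applicable"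
        let key : Nat × String :=
          (pvRules.findIdx (fun r => r.1 state follow), pvOrD (pvGetS item "label") "")
        match best with
        | none => some (key, item)
        | some (bk, bi) =>
          if key.1 < bk.1 ∨ (key.1 = bk.1 ∧ key.2 < bk.2) then some (key, item)
          else some (bk, bi))
    none
  match best with
  | none => [("summary", "Stay local for now; no current approval needs review.")]
  | some ((pri, _), chosen) =>
    let label := pvOrD (pvGetS chosen "label") (pvOrD (pvGetS chosen "subject_key") "Approval")
    pvSetK chosen "summary" ((pvRules.getD pri (fun _ _ => true, fun _ => "")).2 label)

-- ===== PRECONDITION & SPEC =====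
def Spec_next_review_py (records : List (List (String × String))) (out : List (String × String)) : Prop := out = next_review_py_alt records
instance (records : List (List (String × String))) (out : List (String × String)) : Decidable (Spec_next_review_py records out) := by unfold Spec_next_review_py; infer_instance

-- ===== CLAIM (what is proved, stated in full; the proofs are below) =====
def Claim_equal_next_review_py : Prop := ∀ (records : List (List (String × String))), Dom_next_review_py records → Spec_next_review_py records (next_review_py records)

-- ===== LEMMAS AND PROOFS =====

-- proof-side abbreviations for B's selection data
def pvKB1 (item : List (String × String)) : Nat :=
  pvRules.findIdx (fun r => r.1 (pvOrD (pvGetS item "approval_state") "not-applicable")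
                                (pvOrD (pvGetS item "follow_up_state") "not-applicable"))

def pvKB2 (item : List (String × String)) : String := pvOrD (pvGetS item "label") ""

def pvMinStep {α : Type} (lt : α → α → Bool) (m? : Option α) (x : α) : Option α :=
  match m? with
  | none => some x
  | some m => if lt x m then some x else some m

def pvLtB (x m : List (String × String)) : Bool :=
  decide (pvKB1 x < pvKB1 m) || (!decide (pvKB1 m < pvKB1 x) && decide (pvKB2 x < pvKB2 m))

-- head of an insertBy insertion is the smaller of head and the new element
theorem pv_head_insertBy {α : Type} (lt : α → α → Bool) (x : α) (acc : List α) :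
    (PySem.List.insertBy lt x acc).head? = pvMinStep lt acc.head? x := by
  cases acc with
  | nil => simp [PySem.List.insertBy, pvMinStep]
  | cons y ys =>
    by_cases h : lt x y <;> simp [PySem.List.insertBy, pvMinStep, h]

-- head of the insertion-sort fold is the running first-minimum
theorem pv_head_foldl_insertBy {α : Type} (lt : α → α → Bool) (xs : List α) (acc : List α) :
    (List.foldl (fun a x => PySem.List.insertBy lt x a) acc xs).head? =
      List.foldl (pvMinStep lt) acc.head? xs := by
  induction xs generalizing acc with
  | nil => rfl
  | cons x t ih => rw [List.foldl_cons, List.foldl_cons, ih, pv_head_insertBy]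

theorem pv_foldl_minStep_some {α : Type} (lt : α → α → Bool) (xs : List α) (m : α) :
    ∃ m', List.foldl (pvMinStep lt) (some m) xs = some m' := by
  induction xs generalizing m with
  | nil => exact ⟨m, rfl⟩
  | cons x t ih =>
    rw [List.foldl_cons]
    show ∃ m', List.foldl (pvMinStep lt) (if lt x m then some x else some m) t = some m'
    split <;> exact ih _

-- the priority chain of A IS the index of the first matching rule of B
theorem pv_priority_eq (s f : String) :
    pvFuspGet
      (if s = "needs-reapproval" then "needs-reapproval"
       else if f = "overdue-follow-up" then "overdue-follow-up"
       else if s = "ready-for-review" then "ready-for-review"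
       else if f = "due-soon-follow-up" then "due-soon-follow-up"
       else if s = "approved-manual" then "approved-manual"
       else if s = "blocked" then "blocked"
       else if s = "applied" then "applied"
       else "not-applicable")
      = ((pvRules.findIdx (fun r => r.1 s f) : Nat) : Int) := by
  split_ifs with h1 h2 h3 h4 h5 h6 h7 <;>
    simp_all [pvRules, pvFuspGet, FOLLOW_UP_STATE_PRIORITY, List.findIdx_cons, List.find?,
      Bool.cond_eq_ite, beq_iff_eq]

-- the summary chain of A IS the template of the first matching rule of B
theorem pv_summary_eq (s f l : String) :
    (if s = "needs-reapproval" then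
       "Re-approve " ++ l ++ " before any manual apply step."
     else if f = "overdue-follow-up" then
       "Review " ++ l ++ " next because its local follow-up review is overdue."
     else if s = "ready-for-review" then
       "Review " ++ l ++ " next and decide whether to capture approval."
     else if f = "due-soon-follow-up" then
       "Review " ++ l ++ " next because its approved state needs a fresh local follow-up soon."
     else if s = "approved-manual" then
       l ++ " is approved; the next move is still an explicit manual apply."
     else if s = "blocked" then
       l ++ " is blocked; resolve the non-approval blockers before expecting approval to help."
     else
       l ++ " has already been applied and does not need a fresh approval yet.")
    = (pvRules.getD (pvRules.findIdx (fun r => r.1 s f)) (fun _ _ => true, fun _ => "")).2 l := by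
  split_ifs with h1 h2 h3 h4 h5 h6 <;> by_cases h7 : s = "applied" <;>
    simp_all [pvRules, List.findIdx_cons, List.getD, Bool.cond_eq_ite, beq_iff_eq]

theorem pv_kA1_eq (item : List (String × String)) :
    (review_priority item).1 = ((pvKB1 item : Nat) : Int) := by
  simp only [review_priority, pvKB1]
  exact pv_priority_eq _ _

theorem pv_kA2_eq (item : List (String × String)) :
    (review_priority item).2 = pvKB2 item := by
  simp [review_priority, pvKB2]

-- A's sort comparator agrees with B's (priority index, label) comparator
theorem pv_ltA_eq_ltB :
    (fun a b => decide ((review_priority a).1 < (review_priority b).1) ||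
      (!decide ((review_priority b).1 < (review_priority a).1) &&
        decide ((review_priority a).2 < (review_priority b).2))) = pvLtB := by
  funext a b
  simp only [pv_kA1_eq, pv_kA2_eq, pvLtB, Nat.cast_lt]

-- a guarded fold skips exactly the filtered-out elements
theorem pv_guard_filter {α β : Type} (c : α → Bool) (f : β → α → β) (l : List α) (init : β) :
    List.foldl (fun b i => if c i then b else f b i) init l
      = List.foldl f init (l.filter (fun i => !c i)) := by
  induction l generalizing init with
  | nil => rfl
  | cons x t ih => by_cases h : c x <;> simp [h, ih]

-- B's skip test is the complement of A's actionable test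
theorem pv_pred_eq (item : List (String × String)) :
    (!(pvGetS item "approval_state" == some "not-applicable"))
      = decide (pvGetS item "approval_state" ≠ some "not-applicable") := by
  by_cases h : pvGetS item "approval_state" = some "not-applicable" <;> simp [h]

-- B's best-tracking fold is the first-minimum fold, tagged with its key
theorem pv_alt_fold (xs : List (List (String × String)))
    (m? : Option (List (String × String))) :
    List.foldl
      (fun best item =>
        match best with
        | none => some ((pvKB1 item, pvKB2 item), item)
        | some (bk, bi) =>
          if pvKB1 item < bk.1 ∨ (pvKB1 item = bk.1 ∧ pvKB2 item < bk.2)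
          then some ((pvKB1 item, pvKB2 item), item)
          else some (bk, bi))
      (m?.map (fun m => ((pvKB1 m, pvKB2 m), m))) xs
    = (List.foldl (pvMinStep pvLtB) m? xs).map (fun m => ((pvKB1 m, pvKB2 m), m)) := by
  induction xs generalizing m? with
  | nil => rfl
  | cons x t ih =>
    rw [List.foldl_cons, List.foldl_cons]
    cases m? with
    | none => exact ih (some x)
    | some m =>
      have hcond : (pvKB1 x < pvKB1 m ∨ (pvKB1 x = pvKB1 m ∧ pvKB2 x < pvKB2 m))
          ↔ pvLtB x m = true := by
        simp only [pvLtB, Bool.or_eq_true, Bool.and_eq_true, Bool.not_eq_eq_eq_not,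
          Bool.not_true, decide_eq_true_eq, decide_eq_false_iff_not]
        constructor
        · rintro (h | ⟨h1, h2⟩)
          · exact Or.inl h
          · exact Or.inr ⟨by omega, h2⟩
        · rintro (h | ⟨h1, h2⟩)
          · exact Or.inl h
          · rcases Nat.lt_trichotomy (pvKB1 x) (pvKB1 m) with h' | h' | h'
            · exact Or.inl h'
            · exact Or.inr ⟨h', h2⟩
            · exact absurd h' h1
      show List.foldl _
          (if pvKB1 x < pvKB1 m ∨ (pvKB1 x = pvKB1 m ∧ pvKB2 x < pvKB2 m)
           then some ((pvKB1 x, pvKB2 x), x) else some ((pvKB1 m, pvKB2 m), m)) t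
        = (List.foldl (pvMinStep pvLtB) (if pvLtB x m then some x else some m) t).map
            (fun m => ((pvKB1 m, pvKB2 m), m))
      by_cases h : pvLtB x m = true
      · rw [if_pos (hcond.mpr h), if_pos h]; exact ih (some x)
      · rw [if_neg (fun hc => h (hcond.mp hc)), if_neg h]; exact ih (some m)

-- B's port, characterized through the first-minimum fold
theorem pv_B_char (records : List (List (String × String))) :
    next_review_py_alt records =
      match List.foldl (pvMinStep pvLtB) none
          (records.filter (fun item => pvGetS item "approval_state" ≠ some "not-applicable")) with
      | none => [("summary", "Stay local for now; no current approval needs review.")]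
      | some m =>
        pvSetK m "summary"
          ((pvRules.getD (pvKB1 m) (fun _ _ => true, fun _ => "")).2
            (pvOrD (pvGetS m "label") (pvOrD (pvGetS m "subject_key") "Approval"))) := by
  unfold next_review_py_alt
  rw [pv_guard_filter]
  simp only [pv_pred_eq]
  exact Eq.trans
    (congrArg
      (fun o : Option ((Nat × String) × List (String × String)) =>
        match o with
        | none => [("summary", "Stay local for now; no current approval needs review.")]
        | some ((pri, _), chosen) =>
          pvSetK chosen "summary"
            ((pvRules.getD pri (fun _ _ => true, fun _ => "")).2
              (pvOrD (pvGetS chosen "label") (pvOrD (pvGetS chosen "subject_key") "Approval"))))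
      (pv_alt_fold
        (records.filter (fun item => pvGetS item "approval_state" ≠ some "not-applicable")) none))
    (by
      cases List.foldl (pvMinStep pvLtB) none
          (records.filter (fun item => pvGetS item "approval_state" ≠ some "not-applicable")) with
      | none => rfl
      | some m => rfl)


-- ===== VERDICT (by name: the statement is the Claim_ definition above) =====
theorem next_review_py_spec : Claim_equal_next_review_py := by
  intro records _
  unfold Spec_next_review_py
  rw [pv_B_char]
  simp only [next_review_py]
  by_cases hA : records.filter
      (fun item => pvGetS item "approval_state" ≠ some "not-applicable") = []
  · rw [hA]
    rfl
  · rw [if_neg hA]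
    rcases hfl : records.filter
        (fun item => pvGetS item "approval_state" ≠ some "not-applicable") with _ | ⟨a, t⟩
    · exact absurd hfl hA
    obtain ⟨m, hm⟩ := pv_foldl_minStep_some pvLtB t a
    have hfold : List.foldl (pvMinStep pvLtB) none (a :: t) = some m := by
      rw [List.foldl_cons]; exact hm
    have hsorted : (PySem.List.sorted2 (a :: t)
        (fun it => (review_priority it).1) (fun it => (review_priority it).2)).head?
        = some m := by
      rw [show PySem.List.sorted2 (a :: t)
            (fun it => (review_priority it).1) (fun it => (review_priority it).2)
          = List.foldl
              (fun acc x => PySem.List.insertBy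
                (fun a b => decide ((review_priority a).1 < (review_priority b).1) ||
                  (!decide ((review_priority b).1 < (review_priority a).1) &&
                    decide ((review_priority a).2 < (review_priority b).2))) x acc)
              [] (a :: t)
          from rfl]
      rw [pv_ltA_eq_ltB, pv_head_foldl_insertBy]
      exact hfold
    rw [hfold]
    rcases hord : PySem.List.sorted2 (a :: t)
        (fun it => (review_priority it).1) (fun it => (review_priority it).2) with _ | ⟨top, rest⟩
    · rw [hord] at hsorted; cases hsorted
    · rw [hord] at hsorted
      have htop : top = m := by simpa using hsorted
      subst htop
      simp only []
      rw [pv_summary_eq]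
      rfl
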